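-- pv_equiv track=rewrite | github.com/wxl19991003/gan-behavior | experiment/helpdesk_1.py | getsln
-- ===== SOURCE A (Python) =====
-- import copy
--
-- def getsln(trace, eventlist,datatraceindex):
--     sln = []
--     length = len(trace)
--     tag=0
--     l1 = []
--     for j in range(len(eventlist)):
--         l1.append(0)
--     for i in range(length):
--         if i != datatraceindex:
--             line = []
--             for j in range(len(eventlist)):
--                 line.append(0)
--             l = trace[:i + 1]
--             for e in eventlist:
--                 line[eventlist.index(e)] = l.count(e)
--             sln.append(line)
--         else:
--             if datatraceindex !=0:
--                 h=copy.deepcopy(l1)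
--                 sln.append(h)
--             else:
--                 sln.append(l1)
--             tag=1
--     l = []
--     lengthx=len(sln)
--     for j in range(len(eventlist)):
--         l.append(0)
--     for i in range(14-lengthx):
--         sln.append(l)
--     return sln
-- ===== SOURCE B (Python) =====
-- def getsln(trace, eventlist, datatraceindex):
--     idx = {}
--     for j, e in enumerate(eventlist):
--         idx.setdefault(e, j)
--     m = len(eventlist)
--     cnt = [0] * m
--     sln = []
--     for i, x in enumerate(trace):
--         j = idx.get(x)
--         if j is not None:
--             cnt[j] += 1
--         sln.append([0] * m if i == datatraceindex else cnt.copy())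
--     sln.extend([0] * m for _ in range(14 - len(sln)))
--     return sln
-- ===== Notes on version B (the rewrite author's own statement) =====
-- stated objective: faster
-- what changed: Replaces per-prefix recounting (slice + list.count + list.index for every event at every position) by one pass that maintains a running count vector and a precomputed event->first-index dict, copying the vector per row.
import Mathlib
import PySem

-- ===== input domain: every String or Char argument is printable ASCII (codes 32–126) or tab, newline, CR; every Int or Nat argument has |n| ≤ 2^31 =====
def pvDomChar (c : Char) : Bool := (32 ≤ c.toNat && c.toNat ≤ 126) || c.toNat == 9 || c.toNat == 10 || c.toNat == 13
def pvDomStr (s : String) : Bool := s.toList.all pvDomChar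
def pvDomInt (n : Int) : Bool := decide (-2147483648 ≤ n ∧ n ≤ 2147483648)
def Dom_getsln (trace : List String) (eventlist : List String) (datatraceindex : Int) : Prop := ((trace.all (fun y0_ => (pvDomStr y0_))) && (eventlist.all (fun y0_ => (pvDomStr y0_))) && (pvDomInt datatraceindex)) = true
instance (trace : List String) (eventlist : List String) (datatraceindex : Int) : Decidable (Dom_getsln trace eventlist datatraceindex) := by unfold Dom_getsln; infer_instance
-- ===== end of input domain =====

-- ===== PORT A =====
-- B replaces A's per-prefix recounting (slice + count + index per event per position) by one incremental pass maintaining a running count vector with an event->first-index dict.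

-- Python: a zero vector built by an append loop over range(len(eventlist))
def pvZerosLoop (n : Int) : List Int :=
  (PySem.List.pyRange 0 n 1).foldl (fun acc _ => acc ++ [(0 : Int)]) []

-- Python: for e in eventlist: line[eventlist.index(e)] = l.count(e)
-- (eventlist.index(e) always succeeds since e ∈ eventlist, hence the 'none' case is unreachable)
def pvLineLoop (eventlist : List String) (l : List String) (line0 : List Int) : List Int :=
  eventlist.foldl (fun line e =>
    match PySem.List.index? eventlist e with
    | some k => line.set k (PySem.List.count l e)
    | none => line) line0

def getsln (trace : List String) (eventlist : List String) (datatraceindex : Int) : List (List Int) :=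
  let l1 := pvZerosLoop (eventlist.length : Int)
  let st := (PySem.List.pyRange 0 (trace.length : Int) 1).foldl
    (fun (st : List (List Int) × Int) i =>
      if i ≠ datatraceindex then
        let line0 := pvZerosLoop (eventlist.length : Int)
        let l := PySem.List.slice trace none (some (i + 1))
        (st.1 ++ [pvLineLoop eventlist l line0], st.2)
      else
        -- copy.deepcopy(l1) vs l1: same value either way (aliasing only)
        if datatraceindex ≠ 0 then (st.1 ++ [l1], 1)
        else (st.1 ++ [l1], 1)) ([], 0)
  let l := pvZerosLoop (eventlist.length : Int)
  (PySem.List.pyRange 0 (14 - (st.1.length : Int)) 1).foldl (fun s _ => s ++ [l]) st.1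

-- ===== PORT B =====
-- B: event -> first index, built once with dict.setdefault
def pvIdxDict (eventlist : List String) : PySem.Dict String Int :=
  (PySem.List.enumerate eventlist 0).foldl (fun d je => d.setdefault je.2 je.1) PySem.Dict.empty

def getsln_alt (trace : List String) (eventlist : List String) (datatraceindex : Int) : List (List Int) :=
  let idx := pvIdxDict eventlist
  let m := eventlist.length
  let st := (PySem.List.enumerate trace 0).foldl
    (fun (st : List Int × List (List Int)) ix =>
      -- cnt[j] += 1 when x is a tracked event (j = idx[x] is always a valid index)
      let cnt := match idx.get? ix.2 with
        | some j => st.1.set j.toNat (st.1.getD j.toNat 0 + 1)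
        | none => st.1
      (cnt, st.2 ++ [if ix.1 = datatraceindex then List.replicate m 0 else cnt]))
    (List.replicate m (0 : Int), [])
  st.2 ++ List.replicate (14 - st.2.length) (List.replicate m (0 : Int))

-- ===== PRECONDITION & SPEC =====
def Spec_getsln (trace : List String) (eventlist : List String) (datatraceindex : Int) (out : List (List Int)) : Prop := out = getsln_alt trace eventlist datatraceindex
instance (trace : List String) (eventlist : List String) (datatraceindex : Int) (out : List (List Int)) : Decidable (Spec_getsln trace eventlist datatraceindex out) := by unfold Spec_getsln; infer_instance

-- ===== CLAIM (what is proved, stated in full; the proofs are below) =====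
def Claim_equal_getsln : Prop := ∀ (trace : List String) (eventlist : List String) (datatraceindex : Int), Dom_getsln trace eventlist datatraceindex → Spec_getsln trace eventlist datatraceindex (getsln trace eventlist datatraceindex)

-- ===== LEMMAS AND PROOFS =====

-- Proof-side model of B's incremental update: bump the first-occurrence slot of x
def pvBump (evl : List String) (cnt : List Int) (x : String) : List Int :=
  match PySem.List.index? evl x with
  | some k => cnt.set k (cnt.getD k 0 + 1)
  | none => cnt

-- Running count vector after consuming a prefix
def pvCnt (evl : List String) (l : List String) : List Int :=
  l.foldl (pvBump evl) (List.replicate evl.length 0)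

lemma pvZerosLoop_eq (n : Nat) : pvZerosLoop (n : Int) = List.replicate n (0 : Int) := by
  unfold pvZerosLoop
  rw [PySem.List.foldl_append_singleton_eq_map]
  simp [PySem.List.pyRange_one, Function.comp_def, List.map_const']

lemma pvPad (c : Int) (z : List Int) (s : List (List Int)) :
    (PySem.List.pyRange 0 c 1).foldl (fun s _ => s ++ [z]) s = s ++ List.replicate c.toNat z := by
  rw [PySem.List.foldl_append_singleton_eq_map]
  congr 1
  simp [PySem.List.pyRange_one, Function.comp_def, List.map_const']

lemma pvIdxDict_aux (evl : List String) : ∀ (s : Int) (d : PySem.Dict String Int) (x : String),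
    ((PySem.List.enumerate evl s).foldl (fun d je => d.setdefault je.2 je.1) d).get? x
      = ((d.get? x).or ((PySem.List.index? evl x).map (fun k => s + (k : Int)))) := by
  induction evl with
  | nil => intro s d x; simp [PySem.List.enumerate_nil, PySem.List.index?_eq_idxOf?]
  | cons e tl ih =>
    intro s d x
    rw [PySem.List.enumerate_cons]
    simp only [List.foldl_cons]
    rw [ih]
    by_cases hx : x = e
    · subst hx
      rw [PySem.List.index?_cons_self, PySem.Dict.get?_setdefault_self]
      cases hde : d.get? x <;> simp
    · rw [PySem.Dict.get?_setdefault_of_ne _ _ hx, PySem.List.index?_cons_of_ne _ (fun h => hx h.symm)]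
      cases hix : PySem.List.index? tl x
      · simp
      · simp
        ring_nf

lemma pvIdxDict_get? (evl : List String) (x : String) :
    (pvIdxDict evl).get? x = (PySem.List.index? evl x).map (fun k => (k : Int)) := by
  unfold pvIdxDict
  rw [pvIdxDict_aux]
  simp

lemma pvBump_length (evl : List String) (cnt : List Int) (x : String) :
    (pvBump evl cnt x).length = cnt.length := by
  unfold pvBump; cases h : PySem.List.index? evl x <;> simp

lemma pvCnt_length (evl : List String) (l : List String) : (pvCnt evl l).length = evl.length := by
  unfold pvCnt
  induction l using List.reverseRecOn with
  | nil => simp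
  | append_singleton p x ih => rw [List.foldl_append]; simp [List.foldl_cons, pvBump_length, ih]

lemma pvCnt_append_singleton (evl : List String) (p : List String) (x : String) :
    pvCnt evl (p ++ [x]) = pvBump evl (pvCnt evl p) x := by
  unfold pvCnt; rw [List.foldl_append]; rfl

lemma pvBump_dict (evl : List String) (x : String) (cnt : List Int) :
    (match (pvIdxDict evl).get? x with
     | some j => cnt.set j.toNat (cnt.getD j.toNat 0 + 1)
     | none => cnt) = pvBump evl cnt x := by
  rw [pvIdxDict_get?]
  unfold pvBump
  cases h : PySem.List.index? evl x <;> simp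

lemma pvLine_aux (evl l : List String) : ∀ (es : List String) (line0 : List Int),
    evl.length ≤ line0.length → ∀ (j : Nat),
    (es.foldl (fun line e => match PySem.List.index? evl e with
        | some k => line.set k ((PySem.List.count l e : Nat) : Int)
        | none => line) line0)[j]? =
    if ∃ e ∈ es, PySem.List.index? evl e = some j
    then (evl[j]?).map (fun e => ((PySem.List.count l e : Nat) : Int))
    else line0[j]? := by
  intro es
  induction es with
  | nil => intro line0 hlen j; simp
  | cons e tl ih =>
    intro line0 hlen j
    simp only [List.foldl_cons]
    have hstep : (match PySem.List.index? evl e with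
        | some k => line0.set k ((PySem.List.count l e : Nat) : Int)
        | none => line0).length = line0.length := by
      cases PySem.List.index? evl e <;> simp
    rw [ih _ (by omega) j]
    by_cases htl : ∃ e' ∈ tl, PySem.List.index? evl e' = some j
    · rw [if_pos htl, if_pos ⟨htl.choose, List.mem_cons_of_mem _ htl.choose_spec.1, htl.choose_spec.2⟩]
    · rw [if_neg htl]
      by_cases he : PySem.List.index? evl e = some j
      · rw [if_pos ⟨e, List.mem_cons_self, he⟩]
        obtain ⟨hk, hval, _⟩ := PySem.List.getElem_of_index?_eq_some he
        rw [he]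
        simp [List.getElem?_set, List.getElem?_eq_getElem hk, hval]
        omega
      · have hno : ¬ ∃ e' ∈ (e :: tl), PySem.List.index? evl e' = some j := by
          rintro ⟨e', he', hix⟩
          rcases List.mem_cons.1 he' with rfl | hmem
          · exact he hix
          · exact htl ⟨e', hmem, hix⟩
        rw [if_neg hno]
        cases hie : PySem.List.index? evl e with
        | none => simp
        | some k =>
          have hkj : k ≠ j := fun h => he (h ▸ hie)
          simp [hkj]

lemma pvCnt_getElem? (evl : List String) (l : List String) : ∀ (j : Nat) (hj : j < evl.length),
    (pvCnt evl l)[j]? =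
      some (if PySem.List.index? evl (evl[j]'hj) = some j
            then ((PySem.List.count l (evl[j]'hj) : Nat) : Int) else 0) := by
  induction l using List.reverseRecOn with
  | nil =>
    intro j hj
    simp [pvCnt, hj, PySem.List.count_eq]
  | append_singleton p x ih =>
    intro j hj
    rw [pvCnt_append_singleton]
    unfold pvBump
    cases hix : PySem.List.index? evl x with
    | none =>
      have hx : x ∉ evl := (PySem.List.index?_eq_none_iff evl x).1 hix
      have hne : x ≠ evl[j]'hj := fun h => hx (h ▸ List.getElem_mem hj)
      rw [ih j hj]
      simp [PySem.List.count_eq, List.count_append, hne]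
    | some k =>
      obtain ⟨hk, hval, _⟩ := PySem.List.getElem_of_index?_eq_some hix
      have hgetk : (pvCnt evl p).getD k 0 = (PySem.List.count p x : Int) := by
        rw [List.getD_eq_getElem?_getD, ih k hk]
        rw [hval, hix]
        simp
      by_cases hjk : j = k
      · subst hjk
        rw [List.getElem?_set, if_pos rfl, if_pos (by rw [pvCnt_length]; exact hj), hgetk, hval, hix]
        simp [PySem.List.count_eq, List.count_append]
      · rw [List.getElem?_set, if_neg (fun h => hjk h.symm), ih j hj]
        by_cases hne : x = evl[j]'hj
        · have hx : PySem.List.index? evl (evl[j]'hj) = some k := hne ▸ hix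
          rw [hx, if_neg (by intro h; injection h with h'; exact hjk h'.symm),
              if_neg (by intro h; injection h with h'; exact hjk h'.symm)]
        · simp [PySem.List.count_eq, List.count_append, hne]

lemma pvLineLoop_eq_pvCnt (evl l : List String) :
    pvLineLoop evl l (List.replicate evl.length 0) = pvCnt evl l := by
  apply List.ext_getElem?
  intro j
  rw [pvLineLoop, pvLine_aux evl l evl _ (by simp)]
  by_cases hj : j < evl.length
  · rw [pvCnt_getElem? evl l j hj]
    by_cases hcond : PySem.List.index? evl (evl[j]'hj) = some j
    · rw [if_pos ⟨evl[j]'hj, List.getElem_mem hj, hcond⟩, List.getElem?_eq_getElem hj]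
      simp only [PySem.List.index?_eq_idxOf?] at hcond
      simp [hcond]
    · have hno : ¬ ∃ e ∈ evl, PySem.List.index? evl e = some j := by
        rintro ⟨e, _, hix⟩
        obtain ⟨hk, hval, _⟩ := PySem.List.getElem_of_index?_eq_some hix
        exact hcond (hval ▸ hix)
      rw [if_neg hno, if_neg hcond]
      simp [hj]
  · have hno : ¬ ∃ e ∈ evl, PySem.List.index? evl e = some j := by
      rintro ⟨e, _, hix⟩
      obtain ⟨hk, _, _⟩ := PySem.List.getElem_of_index?_eq_some hix
      omega
    rw [if_neg hno]
    rw [List.getElem?_eq_none (by simpa using hj), List.getElem?_eq_none (by rw [pvCnt_length]; omega)]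

lemma pvFoldA (f : Int → List Int) (z : List Int) (dti : Int) :
    ∀ (idxs : List Int) (s : List (List Int)) (t : Int),
    ((idxs.foldl (fun (st : List (List Int) × Int) i =>
        if i ≠ dti then (st.1 ++ [f i], st.2)
        else if dti ≠ 0 then (st.1 ++ [z], 1) else (st.1 ++ [z], 1)) (s, t)).1)
      = s ++ idxs.map (fun i => if i ≠ dti then f i else z) := by
  intro idxs
  induction idxs with
  | nil => intro s t; simp
  | cons i tl ih =>
    intro s t
    simp only [List.foldl_cons, List.map_cons]
    by_cases hi : i ≠ dti
    · rw [if_pos hi, if_pos hi, ih]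
      simp
    · rw [if_neg hi, if_neg hi]
      by_cases h0 : dti ≠ 0
      · rw [if_pos h0, ih]; simp
      · rw [if_neg h0, ih]; simp

lemma pvFoldB (evl : List String) (dti : Int) :
    ∀ (rest p : List String) (sln0 : List (List Int)),
    ((PySem.List.enumerate rest (p.length : Int)).foldl
       (fun (st : List Int × List (List Int)) ix =>
          let cnt := match (pvIdxDict evl).get? ix.2 with
            | some j => st.1.set j.toNat (st.1.getD j.toNat 0 + 1)
            | none => st.1
          (cnt, st.2 ++ [if ix.1 = dti then List.replicate evl.length 0 else cnt]))
       (pvCnt evl p, sln0))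
    = (pvCnt evl (p ++ rest),
       sln0 ++ (List.range rest.length).map (fun (t : Nat) =>
         if ((p.length + t : Nat) : Int) = dti then List.replicate evl.length 0
         else pvCnt evl ((p ++ rest).take (p.length + t + 1)))) := by
  intro rest
  induction rest with
  | nil => intro p sln0; simp [PySem.List.enumerate_nil]
  | cons x tl ih =>
    intro p sln0
    rw [PySem.List.enumerate_cons]
    simp only [List.foldl_cons]
    have hcnt : (match (pvIdxDict evl).get? x with
        | some j => (pvCnt evl p).set j.toNat ((pvCnt evl p).getD j.toNat 0 + 1)
        | none => pvCnt evl p) = pvCnt evl (p ++ [x]) := by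
      rw [pvBump_dict, pvCnt_append_singleton]
    simp only [hcnt]
    rw [show ((p.length : Int) + 1) = (((p ++ [x]).length : Nat) : Int) by simp]
    rw [ih (p ++ [x])]
    have happ : (p ++ [x]) ++ tl = p ++ x :: tl := by simp
    rw [happ]
    refine Prod.ext rfl ?_
    simp only [List.length_cons, List.range_succ_eq_map, List.map_cons, List.map_map]
    rw [List.append_assoc, List.singleton_append]
    have htake : (p ++ x :: tl).take (p.length + 1) = p ++ [x] := by
      rw [List.take_append]
      simp
    simp only [Nat.add_zero, htake]
    congr 1
    simp only [List.cons.injEq, true_and]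
    apply List.map_congr_left
    intro t _
    simp only [Function.comp_apply, Nat.succ_eq_add_one]
    have h1 : (p ++ [x]).length + t = p.length + (t + 1) := by simp; omega
    rw [h1]

lemma pvFoldB0 (evl : List String) (dti : Int) (trace : List String) :
    ((PySem.List.enumerate trace 0).foldl
       (fun (st : List Int × List (List Int)) ix =>
          (match (pvIdxDict evl).get? ix.2 with
            | some j => st.1.set j.toNat (st.1.getD j.toNat 0 + 1)
            | none => st.1,
           st.2 ++ [if ix.1 = dti then List.replicate evl.length 0
             else match (pvIdxDict evl).get? ix.2 with
               | some j => st.1.set j.toNat (st.1.getD j.toNat 0 + 1)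
               | none => st.1]))
       (List.replicate evl.length 0, [])).2
    = (List.range trace.length).map (fun (t : Nat) =>
        if (t : Int) = dti then List.replicate evl.length 0
        else pvCnt evl (trace.take (t + 1))) := by
  have h := congrArg Prod.snd (pvFoldB evl dti trace [] [])
  simpa [pvCnt] using h


-- ===== VERDICT (by name: the statement is the Claim_ definition above) =====
theorem getsln_spec : Claim_equal_getsln := by
  intro trace evl dti _
  unfold Spec_getsln getsln getsln_alt
  dsimp only
  rw [pvFoldA, pvFoldB0, pvPad, List.nil_append]
  have hmap : (PySem.List.pyRange 0 (trace.length : Int) 1).map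
        (fun i => if i ≠ dti then pvLineLoop evl (PySem.List.slice trace none (some (i + 1))) (pvZerosLoop (evl.length : Int)) else pvZerosLoop (evl.length : Int))
      = (List.range trace.length).map (fun (t : Nat) =>
        if (t : Int) = dti then List.replicate evl.length 0
        else pvCnt evl (trace.take (t + 1))) := by
    rw [PySem.List.pyRange_zero_natCast, List.map_map]
    apply List.map_congr_left
    intro t _
    simp only [Function.comp_apply]
    by_cases h : (t : Int) = dti
    · rw [if_neg (by simpa using h), if_pos h, pvZerosLoop_eq]
    · rw [if_pos (by simpa using h), if_neg h]
      rw [show ((t : Int) + 1) = (((t + 1 : Nat) : Nat) : Int) by push_cast; ring,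
          PySem.List.slice_to_natCast, pvZerosLoop_eq, pvLineLoop_eq_pvCnt]
  rw [hmap]
  congr 1
  rw [pvZerosLoop_eq]
  congr 1
  simp
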